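-- pv_equiv track=rewrite | github.com/olsenw/LeetCodeExercises | Python3/maximum_number_of_integers_to_choose_from_a_range_i.py | maxCount_fails
-- ===== SOURCE A (Python) =====
-- from typing import List, Dict, Set, Optional
--
-- def maxCount_fails(banned: List[int], n: int, maxSum: int) -> int:
--     banned.sort()
--     s = 0
--     j = 0
--     for i in range(1, n+1):
--         # problem: banned repeat numbers
--         if j < len(banned) and i == banned[j]:
--             j += 1
--         elif s + i > maxSum:
--             # problem: over count banned repeat numbers
--             return i - j - 1
--         else:
--             s += i
--     return n - j
-- ===== SOURCE B (Python) =====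
-- def maxCount_fails(banned, n, maxSum):
--     banned.sort()
--     count = 0
--     budget = maxSum
--     lo = 1  # smallest integer not yet considered
--     for v in banned:
--         if v > n or v < lo:
--             break
--         # take every integer in [lo, v-1] the budget affords, then step over v
--         m = _take(lo, v - 1, budget)
--         count += m
--         if m < v - lo:
--             return count
--         budget -= m * lo + m * (m - 1) // 2
--         lo = v + 1
--     return count + _take(lo, n, budget)
--
--
-- def _take(lo, hi, r):
--     # largest m <= max(hi-lo+1, 0) with lo + (lo+1) + ... + (lo+m-1) <= r
--     a, b = 0, max(hi - lo + 1, 0)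
--     while a < b:
--         m = (a + b + 1) // 2
--         if m * lo + m * (m - 1) // 2 <= r:
--             a = m
--         else:
--             b = m - 1
--     return a
-- ===== Notes on version B (the rewrite author's own statement) =====
-- stated objective: alternative
-- what changed: Instead of testing every integer 1..n one at a time against a banned-list pointer, B walks the sorted banned list once and takes each gap of free integers in one step with a closed-form arithmetic-series cost and a binary search for the last affordable number (stopping, like the scan, at the first banned entry that is behind it or beyond n); Pre_ restricts to the natural domain n >= 0 (n is the size of the candidate range 1..n), since for negative n A happens to return n itself.
-- outside the precondition, e.g. on maxCount_fails([], -3, 5): A returns -3, B returns 0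
import Mathlib
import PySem

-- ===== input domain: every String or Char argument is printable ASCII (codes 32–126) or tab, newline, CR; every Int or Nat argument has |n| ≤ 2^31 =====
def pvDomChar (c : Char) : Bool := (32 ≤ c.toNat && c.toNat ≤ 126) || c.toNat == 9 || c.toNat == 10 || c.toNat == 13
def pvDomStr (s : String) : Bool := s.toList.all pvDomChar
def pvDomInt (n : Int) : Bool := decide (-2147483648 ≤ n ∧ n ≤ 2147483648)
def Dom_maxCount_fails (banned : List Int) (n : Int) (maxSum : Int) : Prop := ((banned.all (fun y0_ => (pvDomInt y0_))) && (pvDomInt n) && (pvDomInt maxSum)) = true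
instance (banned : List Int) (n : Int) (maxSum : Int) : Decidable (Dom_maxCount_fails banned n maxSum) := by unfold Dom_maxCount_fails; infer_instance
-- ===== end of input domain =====

-- B replaces A's one-by-one scan of 1..n by a walk over the sorted banned list that takes
-- each gap of free integers with a closed-form arithmetic-series sum plus a binary search
-- (objective: a genuinely different algorithm). Both A and B sort `banned` in place; the
-- claim is about the return value. Pre_ restricts to the natural domain n ≥ 0.

-- ===== PORT A =====
-- the for-loop over range(1, n+1) with early return; fuel = number of remaining iterations
def pvGoA (bs : List Int) (n maxSum : Int) (s j i : Int) : Nat → Int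
  | 0 => n - j
  | Nat.succ fuel =>
    if decide (j < (bs.length : Int)) && (PySem.List.pyGet? bs j == some i) then
      pvGoA bs n maxSum s (j + 1) (i + 1) fuel
    else if maxSum < s + i then i - j - 1
    else pvGoA bs n maxSum (s + i) j (i + 1) fuel

def maxCount_fails (banned : List Int) (n : Int) (maxSum : Int) : Int :=
  pvGoA (PySem.List.sorted banned (fun x => x) false) n maxSum 0 0 1 n.toNat

-- ===== PORT B =====
-- binary search of Source B's _take: largest m in [a,b] with m*lo + m*(m-1)//2 <= r
-- (fuel = the initial interval length bounds the iterations of the while loop)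
def pvBs (lo r : Int) (a b : Int) : Nat → Int
  | 0 => a
  | Nat.succ fuel =>
    if a < b then
      let m := PySem.Int.floordiv (a + b + 1) 2
      if m * lo + PySem.Int.floordiv (m * (m - 1)) 2 ≤ r then pvBs lo r m b fuel
      else pvBs lo r a (m - 1) fuel
    else a

def pvTake (lo hi r : Int) : Int :=
  pvBs lo r 0 (max (hi - lo + 1) 0) (max (hi - lo + 1) 0).toNat

-- the for-loop of Source B over the sorted banned list (break → the code after the loop)
def pvGoB : List Int → Int → Int → Int → Int → Int
  | [], n, budget, lo, count => count + pvTake lo n budget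
  | v :: rest, n, budget, lo, count =>
    if decide (n < v) || decide (v < lo) then count + pvTake lo n budget
    else
      let m := pvTake lo (v - 1) budget
      let count' := count + m
      if m < v - lo then count'
      else pvGoB rest n (budget - (m * lo + PySem.Int.floordiv (m * (m - 1)) 2)) (v + 1) count'

def maxCount_fails_alt (banned : List Int) (n : Int) (maxSum : Int) : Int :=
  pvGoB (PySem.List.sorted banned (fun x => x) false) n maxSum 1 0

-- ===== PRECONDITION & SPEC =====
-- Pre_ restricts to the natural domain n ≥ 0 (n is the size of the range 1..n of
-- candidate integers); for negative n A happens to return n itself, a negative count.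
def Pre_maxCount_fails (banned : List Int) (n : Int) (maxSum : Int) : Prop := 0 ≤ n
instance (banned : List Int) (n : Int) (maxSum : Int) : Decidable (Pre_maxCount_fails banned n maxSum) := by unfold Pre_maxCount_fails; infer_instance
def pvWitness_maxCount_fails : List Int × Int × Int := ([1], 5, 10)

def Spec_maxCount_fails (banned : List Int) (n : Int) (maxSum : Int) (out : Int) : Prop :=
  out = maxCount_fails_alt banned n maxSum
instance (banned : List Int) (n : Int) (maxSum : Int) (out : Int) : Decidable (Spec_maxCount_fails banned n maxSum out) := by unfold Spec_maxCount_fails; infer_instance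

-- ===== CLAIM (what is proved, stated in full; the proofs are below) =====
def Claim_equal_maxCount_fails : Prop := ∀ (banned : List Int) (n : Int) (maxSum : Int), Dom_maxCount_fails banned n maxSum → Pre_maxCount_fails banned n maxSum → Spec_maxCount_fails banned n maxSum (maxCount_fails banned n maxSum)

-- ===== LEMMAS AND PROOFS =====

-- the predicate pvBs tests: m numbers starting at lo cost at most r
def pvP (lo r m : Int) : Prop := m * lo + PySem.Int.floordiv (m * (m - 1)) 2 ≤ r

lemma pv_fd_two (m : Int) : 2 * PySem.Int.floordiv (m * (m - 1)) 2 = m * (m - 1) := by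
  have h : PySem.Int.floordiv (m * (m - 1)) 2 = (m * (m - 1)) / 2 :=
    PySem.Int.floordiv_eq_ediv_of_pos (by norm_num)
  have he : Even (m * (m - 1)) := by
    have h2 := Int.even_mul_succ_self (m - 1)
    rwa [show (m - 1) * (m - 1 + 1) = m * (m - 1) by ring] at h2
  obtain ⟨c, hc⟩ := he
  rw [h, hc]
  omega

lemma pvP_mono (lo r : Int) (hlo : 1 ≤ lo) {m m' : Int} (h0 : 0 ≤ m') (hmm : m' ≤ m)
    (h : pvP lo r m) : pvP lo r m' := by
  unfold pvP at h ⊢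
  have e1 := pv_fd_two m
  have e2 := pv_fd_two m'
  have hkey : m * (m - 1) = m' * (m' - 1) + (m - m') * (m + m' - 1) := by ring
  have hnn : 0 ≤ (m - m') * (m + m' - 1) := by
    rcases eq_or_lt_of_le hmm with h' | h'
    · subst h'; simp
    · exact mul_nonneg (by omega) (by omega)
  have hml : m' * lo ≤ m * lo := mul_le_mul_of_nonneg_right hmm (by omega)
  linarith

lemma pvP_shift (lo r : Int) {m : Int} (_hm : 1 ≤ m) :
    pvP lo r m ↔ pvP (lo + 1) (r - lo) (m - 1) := by
  unfold pvP
  have e1 := pv_fd_two m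
  have e2 := pv_fd_two (m - 1)
  have k1 : m * (m - 1) = (m - 1) * (m - 1 - 1) + 2 * (m - 1) := by ring
  have k2 : (m - 1) * (lo + 1) = m * lo - lo + m - 1 := by ring
  constructor <;> intro h <;> linarith

lemma pvP_one (lo r : Int) : pvP lo r 1 ↔ lo ≤ r := by
  unfold pvP
  have e := pv_fd_two 1
  constructor <;> intro h <;> linarith

lemma pvBs_char (lo r : Int) (hlo : 1 ≤ lo) :
    ∀ (fuel : Nat) (a b : Int), (b - a).toNat ≤ fuel → 0 ≤ a → a ≤ b → (a = 0 ∨ pvP lo r a) →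
      a ≤ pvBs lo r a b fuel ∧ pvBs lo r a b fuel ≤ b ∧
      (pvBs lo r a b fuel = 0 ∨ pvP lo r (pvBs lo r a b fuel)) ∧
      (∀ x, pvBs lo r a b fuel < x → x ≤ b → ¬ pvP lo r x) := by
  intro fuel
  induction fuel with
  | zero =>
    intro a b hk ha hab hPa
    have hba : a = b := by omega
    have h0 : pvBs lo r a b 0 = a := rfl
    rw [h0]
    exact ⟨le_refl a, hab, hPa, fun x h1 h2 => absurd h1 (by omega)⟩
  | succ fuel ih =>
    intro a b hk ha hab hPa
    by_cases hlt : a < b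
    · have hm := PySem.Int.floordiv_two_mid_bounds (lo := a + 1) (hi := b) (by omega)
      have he : a + 1 + b = a + b + 1 := by ring
      rw [he] at hm
      set m := PySem.Int.floordiv (a + b + 1) 2 with hmdef
      by_cases hP : m * lo + PySem.Int.floordiv (m * (m - 1)) 2 ≤ r
      · have heq : pvBs lo r a b (fuel + 1) = pvBs lo r m b fuel := by
          show (if a < b then _ else _) = _
          rw [if_pos hlt]
          simp only [← hmdef, if_pos hP]
        have hrec := ih m b (by omega) (by omega) (by omega) (Or.inr hP)
        rw [heq]
        refine ⟨by omega, hrec.2.1, hrec.2.2.1, hrec.2.2.2⟩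
      · have heq : pvBs lo r a b (fuel + 1) = pvBs lo r a (m - 1) fuel := by
          show (if a < b then _ else _) = _
          rw [if_pos hlt]
          simp only [← hmdef, if_neg hP]
        have hrec := ih a (m - 1) (by omega) ha (by omega) hPa
        rw [heq]
        refine ⟨hrec.1, by omega, hrec.2.2.1, ?_⟩
        intro x hx hxb
        by_cases hxm : x ≤ m - 1
        · exact hrec.2.2.2 x hx hxm
        · intro hPx
          exact hP (pvP_mono lo r hlo (by omega) (by omega) hPx)
    · have heq : pvBs lo r a b (fuel + 1) = a := by
        show (if a < b then _ else _) = _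
        rw [if_neg hlt]
      rw [heq]
      exact ⟨le_refl a, hab, hPa, by intro x h1 h2; omega⟩

lemma pvTake_char (lo hi r : Int) (hlo : 1 ≤ lo) :
    0 ≤ pvTake lo hi r ∧ pvTake lo hi r ≤ max (hi - lo + 1) 0 ∧
    (pvTake lo hi r = 0 ∨ pvP lo r (pvTake lo hi r)) ∧
    (∀ x, pvTake lo hi r < x → x ≤ max (hi - lo + 1) 0 → ¬ pvP lo r x) := by
  exact pvBs_char lo r hlo (max (hi - lo + 1) 0).toNat 0 (max (hi - lo + 1) 0)
    (by omega) (by omega) (by omega) (Or.inl rfl)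

lemma pvTake_nil (lo hi r : Int) (h : hi < lo) : pvTake lo hi r = 0 := by
  unfold pvTake
  have : max (hi - lo + 1) 0 = 0 := by omega
  rw [this]
  rfl

lemma pvTake_step (lo hi r : Int) (hlo : 1 ≤ lo) (hle : lo ≤ hi) :
    pvTake lo hi r = if lo ≤ r then 1 + pvTake (lo + 1) hi (r - lo) else 0 := by
  have hL : max (hi - lo + 1) 0 = hi - lo + 1 := by omega
  have hL' : max (hi - (lo + 1) + 1) 0 = hi - lo := by omega
  have hc := pvBs_char lo r hlo (hi - lo + 1).toNat 0 (hi - lo + 1) (by omega) (by omega) (by omega) (Or.inl rfl)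
  have hc' := pvBs_char (lo + 1) (r - lo) (by omega) (hi - lo).toNat 0 (hi - lo) (by omega) (by omega) (by omega) (Or.inl rfl)
  set c := pvBs lo r 0 (hi - lo + 1) (hi - lo + 1).toNat with hcdef
  set c' := pvBs (lo + 1) (r - lo) 0 (hi - lo) (hi - lo).toNat with hcdef'
  unfold pvTake
  rw [hL, hL', ← hcdef, ← hcdef']
  by_cases hr : lo ≤ r
  · rw [if_pos hr]
    have hP1 : pvP lo r 1 := (pvP_one lo r).mpr hr
    rcases lt_trichotomy c (1 + c') with h | h | h
    · exfalso
      have hPc1 : pvP lo r (c + 1) := by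
        rcases hc'.2.2.1 with h0 | hPc'
        · have : c = 0 := by omega
          rw [this]; simpa using hP1
        · have : pvP lo r (c' + 1) := by
            have := (pvP_shift lo r (m := c' + 1) (by omega)).mpr
            simp only [add_sub_cancel_right] at this
            exact this hPc'
          exact pvP_mono lo r hlo (by omega) (by omega) this
      exact hc.2.2.2 (c + 1) (by omega) (by omega) hPc1
    · exact h
    · exfalso
      have hPc : pvP lo r c := by
        rcases hc.2.2.1 with h0 | hPc
        · omega
        · exact hPc
      have : pvP (lo + 1) (r - lo) (c - 1) := (pvP_shift lo r (m := c) (by omega)).mp hPc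
      exact hc'.2.2.2 (c - 1) (by omega) (by omega) this
  · rw [if_neg hr]
    by_contra hne
    have hc1 : 1 ≤ c := by omega
    have hPc : pvP lo r c := by
      rcases hc.2.2.1 with h0 | h
      · omega
      · exact h
    have : pvP lo r 1 := pvP_mono lo r hlo (by omega) hc1 hPc
    exact hr ((pvP_one lo r).mp this)

lemma pvTake_zero (lo hi r : Int) (hlo : 1 ≤ lo) (hr : r < lo) : pvTake lo hi r = 0 := by
  by_cases h : lo ≤ hi
  · rw [pvTake_step lo hi r hlo h, if_neg (show ¬ lo ≤ r by omega)]
  · exact pvTake_nil lo hi r (by omega)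

-- ---- A-side abstraction: the gap walk the scan of A implements ----

def pvFinal (n r lo count skipped : Int) : Int :=
  let m := pvTake lo n r
  if m < n - lo + 1 then count + m else n - skipped

def pvSeg : List Int → Int → Int → Int → Int → Int → Int
  | [], n, r, lo, count, skipped => pvFinal n r lo count skipped
  | v :: ps, n, r, lo, count, skipped =>
    if n < v then pvFinal n r lo count skipped
    else
      let m := pvTake lo (v - 1) r
      if m < v - lo then count + m
      else pvSeg ps n (r - (m * lo + PySem.Int.floordiv (m * (m - 1)) 2)) (v + 1) (count + m) (skipped + 1)

-- the strictly increasing (from lo) prefix of a list: the banned entries A's pointer can consume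
def pvSpf (lo : Int) : List Int → List Int
  | [] => []
  | v :: t => if v < lo then [] else v :: pvSpf (v + 1) t

lemma pvSpf_head (lo : Int) (l : List Int) :
    ∀ v, (pvSpf lo l).head? = some v → lo ≤ v := by
  cases l with
  | nil => intro v h; simp [pvSpf] at h
  | cons w t =>
    intro v h
    by_cases hw : w < lo
    · simp [pvSpf, hw] at h
    · simp [pvSpf, hw] at h
      omega

lemma pvSpf_bump (lo : Int) (l : List Int)
    (h : ∀ v, l.head? = some v → v ≠ lo) : pvSpf lo l = pvSpf (lo + 1) l := by
  cases l with
  | nil => rfl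
  | cons w t =>
    have hw := h w rfl
    show (if w < lo then [] else w :: pvSpf (w + 1) t) = if w < lo + 1 then [] else w :: pvSpf (w + 1) t
    by_cases hlt : w < lo
    · simp [hlt, show w < lo + 1 by omega]
    · simp [hlt, show ¬ w < lo + 1 by omega]

-- ---- step lemmas about pvSeg ----

lemma pvSeg_done (ps : List Int) (n r lo count skipped : Int)
    (hhead : ∀ v, ps.head? = some v → n < v) (hlo : n < lo) :
    pvSeg ps n r lo count skipped = n - skipped := by
  have hfin : pvFinal n r lo count skipped = n - skipped := by
    unfold pvFinal
    rw [pvTake_nil lo n r hlo]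
    rw [if_neg (by omega)]
  cases ps with
  | nil => simpa [pvSeg] using hfin
  | cons v t =>
    have hv := hhead v rfl
    simpa [pvSeg, hv] using hfin

lemma pvSeg_skip (ps : List Int) (n r v count skipped : Int) (hv : v ≤ n) :
    pvSeg (v :: ps) n r v count skipped = pvSeg ps n r (v + 1) count (skipped + 1) := by
  show (if n < v then _ else _) = _
  rw [if_neg (by omega)]
  have ht : pvTake v (v - 1) r = 0 := pvTake_nil v (v - 1) r (by omega)
  simp only [ht]
  rw [if_neg (by omega)]
  have h0 : PySem.Int.floordiv ((0 : Int) * (0 - 1)) 2 = 0 := by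
    have := pv_fd_two 0
    omega
  rw [h0]
  norm_num

lemma pvSeg_free (ps : List Int) (n r lo count skipped : Int) (hlo : 1 ≤ lo) (hn : lo ≤ n)
    (hr : lo ≤ r) (hhead : ∀ v, ps.head? = some v → lo < v) :
    pvSeg ps n r lo count skipped = pvSeg ps n (r - lo) (lo + 1) (count + 1) skipped := by
  have hfin : pvFinal n r lo count skipped = pvFinal n (r - lo) (lo + 1) (count + 1) skipped := by
    unfold pvFinal
    rw [pvTake_step lo n r hlo hn, if_pos hr]
    set m' := pvTake (lo + 1) n (r - lo) with hm'
    by_cases hb : 1 + m' < n - lo + 1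
    · rw [if_pos hb, if_pos (by omega)]
      ring
    · rw [if_neg hb, if_neg (by omega)]
  cases ps with
  | nil => simpa [pvSeg] using hfin
  | cons v t =>
    have hv := hhead v rfl
    by_cases hvn : n < v
    · simpa [pvSeg, hvn] using hfin
    · show (if n < v then _ else _) = (if n < v then _ else _)
      rw [if_neg hvn, if_neg hvn]
      rw [pvTake_step lo (v - 1) r hlo (by omega), if_pos hr]
      set m' := pvTake (lo + 1) (v - 1) (r - lo) with hm'
      have hchar := pvBs_char (lo + 1) (r - lo) (by omega) (max (v - 1 - (lo + 1) + 1) 0).toNat 0 (max (v - 1 - (lo + 1) + 1) 0) (by omega) (by omega) (by omega) (Or.inl rfl)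
      have hm'0 : 0 ≤ m' := by
        have := hchar.1
        simpa [pvTake, ← hm'] using this
      by_cases hb : 1 + m' < v - lo
      · rw [if_pos hb, if_pos (by omega)]
        ring
      · rw [if_neg hb, if_neg (by omega)]
        have e1 := pv_fd_two (1 + m')
        have e2 := pv_fd_two m'
        have hsum : (1 + m') * lo + PySem.Int.floordiv ((1 + m') * (1 + m' - 1)) 2
            = lo + (m' * (lo + 1) + PySem.Int.floordiv (m' * (m' - 1)) 2) := by
          have k : (1 + m') * (1 + m' - 1) = m' * (m' - 1) + 2 * m' := by ring
          have k2 : (1 + m') * lo = m' * lo + lo := by ring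
          have k3 : m' * (lo + 1) = m' * lo + m' := by ring
          linarith
        rw [hsum]
        have : r - (lo + (m' * (lo + 1) + PySem.Int.floordiv (m' * (m' - 1)) 2))
            = r - lo - (m' * (lo + 1) + PySem.Int.floordiv (m' * (m' - 1)) 2) := by ring
        rw [this]
        have hcnt : count + (1 + m') = count + 1 + m' := by ring
        rw [hcnt]

lemma pvSeg_stop (ps : List Int) (n r lo count skipped : Int) (hlo : 1 ≤ lo) (hn : lo ≤ n)
    (hr : r < lo) (hhead : ∀ v, ps.head? = some v → lo < v) :
    pvSeg ps n r lo count skipped = count := by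
  have hfin : pvFinal n r lo count skipped = count := by
    unfold pvFinal
    rw [pvTake_zero lo n r hlo hr, if_pos (show (0 : Int) < n - lo + 1 by omega)]
    ring
  cases ps with
  | nil => simpa [pvSeg] using hfin
  | cons v t =>
    have hv := hhead v rfl
    by_cases hvn : n < v
    · simpa [pvSeg, hvn] using hfin
    · show (if n < v then _ else _) = _
      rw [if_neg hvn]
      rw [pvTake_zero lo (v - 1) r hlo hr, if_pos (show (0 : Int) < v - lo by omega)]
      norm_num

-- ---- the A-side bridge: A's scan equals the gap walk over its consumable prefix ----

lemma pv_main (bs : List Int) (n maxSum : Int) :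
    ∀ (fuel : Nat) (s j i : Int), 0 ≤ j → 1 ≤ i → fuel = (n + 1 - i).toNat →
      pvGoA bs n maxSum s j i fuel
        = pvSeg (pvSpf i (bs.drop j.toNat)) n (maxSum - s) i (i - 1 - j) j := by
  intro fuel
  induction fuel with
  | zero =>
    intro s j i hj hi hfuel
    have hni : n < i := by omega
    show n - j = _
    rw [pvSeg_done _ _ _ _ _ _ (fun v hv => lt_of_lt_of_le hni (pvSpf_head i _ v hv)) hni]
  | succ fuel ih =>
    intro s j i hj hi hfuel
    have hin : i ≤ n := by omega
    have hget : PySem.List.pyGet? bs j = bs[j.toNat]? := PySem.List.pyGet?_of_nonneg bs hj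
    by_cases hmatch : bs[j.toNat]? = some i
    · have hjlen : j.toNat < bs.length := by
        by_contra h
        rw [List.getElem?_eq_none (by omega)] at hmatch
        simp at hmatch
      have hguard : (decide (j < (bs.length : Int)) && (PySem.List.pyGet? bs j == some i)) = true := by
        rw [hget, hmatch]
        simp
        omega
      show (if _ then _ else _) = _
      rw [hguard]
      simp only [if_true]
      rw [ih s (j + 1) (i + 1) (by omega) (by omega) (by omega)]
      have hdrop : bs.drop j.toNat = i :: bs.drop (j.toNat + 1) := by
        rw [List.drop_eq_getElem_cons hjlen]
        congr 1
        have := hmatch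
        rw [List.getElem?_eq_getElem hjlen] at this
        exact Option.some_injective _ this
      have hspf : pvSpf i (bs.drop j.toNat) = i :: pvSpf (i + 1) (bs.drop (j.toNat + 1)) := by
        rw [hdrop]
        show (if i < i then _ else _) = _
        rw [if_neg (by omega)]
      rw [hspf, pvSeg_skip _ _ _ _ _ _ hin]
      have hjn : (j + 1).toNat = j.toNat + 1 := by omega
      rw [hjn]
      congr 1
      omega
    · have hguard : (decide (j < (bs.length : Int)) && (PySem.List.pyGet? bs j == some i)) = false := by
        rw [hget]
        cases h : bs[j.toNat]? with
        | none => simp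
        | some w =>
          have : w ≠ i := by intro he; exact hmatch (by rw [h, he])
          simp [this]
      show (if _ then _ else _) = _
      rw [hguard]
      simp only [Bool.false_eq_true, if_false]
      have hheadne : ∀ v, (bs.drop j.toNat).head? = some v → v ≠ i := by
        intro v hv he
        rw [List.head?_drop] at hv
        exact hmatch (by rw [hv, he])
      have hbump : pvSpf i (bs.drop j.toNat) = pvSpf (i + 1) (bs.drop j.toNat) := pvSpf_bump _ _ hheadne
      have hheadgt : ∀ v, (pvSpf (i + 1) (bs.drop j.toNat)).head? = some v → i < v := by
        intro v hv
        have := pvSpf_head (i + 1) _ v hv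
        omega
      by_cases hover : maxSum < s + i
      · rw [if_pos hover]
        rw [hbump, pvSeg_stop _ _ _ _ _ _ hi hin (by omega) hheadgt]
        omega
      · rw [if_neg hover]
        rw [ih (s + i) j (i + 1) hj (by omega) (by omega)]
        rw [hbump, pvSeg_free _ _ _ _ _ _ hi hin (by omega) hheadgt]
        have h1 : maxSum - s - i = maxSum - (s + i) := by ring
        have h2 : i - 1 - j + 1 = i + 1 - 1 - j := by ring
        rw [h1, h2]

-- ---- bridging A's walk to B's loop ----

-- once past every consumable banned entry, the final segment's take equals pvFinal
lemma final_eq (n r lo count skipped : Int) (hlo : 1 ≤ lo) (hln : lo ≤ n + 1)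
    (hcnt : count = lo - 1 - skipped) :
    pvFinal n r lo count skipped = count + pvTake lo n r := by
  unfold pvFinal
  have hc := pvTake_char lo n r hlo
  set m := pvTake lo n r with hm
  by_cases hb : m < n - lo + 1
  · rw [if_pos hb]
  · rw [if_neg hb]
    have : m = n - lo + 1 := by omega
    omega

-- the gap walk over the consumable prefix is exactly B's loop over the sorted list
lemma goB_eq : ∀ (l : List Int) (n r lo count skipped : Int), l.Pairwise (· ≤ ·) →
    1 ≤ lo → lo ≤ n + 1 → count = lo - 1 - skipped →
    pvSeg (pvSpf lo l) n r lo count skipped = pvGoB l n r lo count := by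
  intro l
  induction l with
  | nil =>
    intro n r lo count skipped _ hlo hln hcnt
    show pvFinal n r lo count skipped = count + pvTake lo n r
    exact final_eq n r lo count skipped hlo hln hcnt
  | cons v rest ih =>
    intro n r lo count skipped hpw hlo hln hcnt
    by_cases hvlo : v < lo
    · -- B breaks; the consumable prefix is empty
      have hspf : pvSpf lo (v :: rest) = [] := by
        show (if v < lo then _ else _) = _
        rw [if_pos hvlo]
      rw [hspf]
      show pvFinal n r lo count skipped = pvGoB (v :: rest) n r lo count
      have hguard : (decide (n < v) || decide (v < lo)) = true := by simp [hvlo]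
      show _ = (if (decide (n < v) || decide (v < lo)) = true then _ else _)
      rw [if_pos hguard]
      exact final_eq n r lo count skipped hlo hln hcnt
    · have hspf : pvSpf lo (v :: rest) = v :: pvSpf (v + 1) rest := by
        show (if v < lo then _ else _) = _
        rw [if_neg hvlo]
      rw [hspf]
      by_cases hvn : n < v
      · -- B breaks; A's walk sees a banned entry beyond n
        have hA : pvSeg (v :: pvSpf (v + 1) rest) n r lo count skipped
            = pvFinal n r lo count skipped := by
          show (if n < v then _ else _) = _
          rw [if_pos hvn]
        have hguard : (decide (n < v) || decide (v < lo)) = true := by simp [hvn]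
        rw [hA]
        show _ = (if (decide (n < v) || decide (v < lo)) = true then _ else _)
        rw [if_pos hguard]
        exact final_eq n r lo count skipped hlo hln hcnt
      · -- a consumable in-range banned entry: both take the gap [lo, v-1]
        have hguard : (decide (n < v) || decide (v < lo)) = false := by
          simp [hvn, hvlo]
        have hc := pvTake_char lo (v - 1) r hlo
        have hcap : max (v - 1 - lo + 1) 0 = v - lo := by omega
        rw [hcap] at hc
        show (if n < v then _ else _) = pvGoB (v :: rest) n r lo count
        rw [if_neg hvn]
        show (if pvTake lo (v - 1) r < v - lo then _ else _)
          = (if (decide (n < v) || decide (v < lo)) = true then _ else _)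
        rw [hguard]
        simp only [Bool.false_eq_true, if_false]
        set m := pvTake lo (v - 1) r with hm
        show (if m < v - lo then count + m else _)
          = (let m' := pvTake lo (v - 1) r; let count' := count + m';
            if m' < v - lo then count' else pvGoB rest n
              (r - (m' * lo + PySem.Int.floordiv (m' * (m' - 1)) 2)) (v + 1) count')
        simp only [← hm]
        by_cases hb : m < v - lo
        · rw [if_pos hb, if_pos hb]
        · rw [if_neg hb, if_neg hb]
          have hmeq : m = v - lo := by omega
          exact ih n (r - (m * lo + PySem.Int.floordiv (m * (m - 1)) 2)) (v + 1)
            (count + m) (skipped + 1) (List.Pairwise.sublist (by simp) hpw)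
            (by omega) (by omega) (by omega)

-- ===== VERDICT (by name: the statement is the Claim_ definition above) =====
theorem maxCount_fails_spec : Claim_equal_maxCount_fails := by
  intro banned n maxSum _ hPre
  unfold Pre_maxCount_fails at hPre
  show maxCount_fails banned n maxSum = maxCount_fails_alt banned n maxSum
  have hA : maxCount_fails banned n maxSum
      = pvSeg (pvSpf 1 (PySem.List.sorted banned (fun x => x) false)) n maxSum 1 0 0 := by
    show pvGoA (PySem.List.sorted banned (fun x => x) false) n maxSum 0 0 1 n.toNat = _
    rw [pv_main _ n maxSum n.toNat 0 0 1 (by omega) (by omega) (by omega)]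
    norm_num
  rw [hA]
  exact goB_eq (PySem.List.sorted banned (fun x => x) false) n maxSum 1 0 0
    (PySem.List.sorted_pairwise banned (fun x => x)) (by omega) (by omega) (by omega)
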